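-- pv_equiv track=rewrite | github.com/shubhangtiwari/event-assessment | core/scorer.py | _score_ordinal
-- ===== SOURCE A (Python) =====
-- def _score_ordinal(value: str | None, scale: dict[str, int]) -> int:
--     if not value:
--         return 0
--     v = value.strip().lower()
--     # Longest key first so "tried once or twice" beats "tried".
--     for key in sorted(scale.keys(), key=len, reverse=True):
--         if key in v:
--             return scale[key]
--     return 0
-- ===== SOURCE B (Python) =====
-- def _score_ordinal(value: str | None, scale: dict[str, int]) -> int:
--     if not value:
--         return 0
--     v = value.strip().lower()
--     best_len = -1
--     best = 0
--     for key, score in scale.items():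
--         if key in v and len(key) > best_len:
--             best_len = len(key)
--             best = score
--     return best
-- ===== Notes on version B (the rewrite author's own statement) =====
-- stated objective: simpler
-- what changed: drops the length-descending sort entirely: a single pass over scale.items() keeps the score of the longest matching key seen so far (strict > reproduces the stable sort's first-in-insertion-order tie-break)
import Mathlib
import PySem

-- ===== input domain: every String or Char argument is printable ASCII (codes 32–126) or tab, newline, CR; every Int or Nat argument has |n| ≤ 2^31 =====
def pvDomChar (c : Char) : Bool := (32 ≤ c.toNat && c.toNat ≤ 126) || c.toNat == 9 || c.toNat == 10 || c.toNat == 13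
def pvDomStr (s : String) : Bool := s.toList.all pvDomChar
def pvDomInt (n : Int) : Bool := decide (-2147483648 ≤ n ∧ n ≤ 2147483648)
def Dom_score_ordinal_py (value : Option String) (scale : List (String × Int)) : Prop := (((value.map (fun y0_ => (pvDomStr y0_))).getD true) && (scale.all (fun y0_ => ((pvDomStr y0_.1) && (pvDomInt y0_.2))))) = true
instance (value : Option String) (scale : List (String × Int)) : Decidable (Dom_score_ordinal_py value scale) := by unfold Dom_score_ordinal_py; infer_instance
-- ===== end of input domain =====

-- B replaces A's sort-then-first-match by a single pass tracking the longest matching key (simpler, no sort).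


-- ===== PORT A =====
-- scale[key]: first (unique, under Pre_) binding of key; the 0 default is never reached since key comes from scale's keys
def pvLookup (scale : List (String × Int)) (k : String) : Int :=
  match scale.find? (fun p => p.1 == k) with
  | some p => p.2
  | none => 0

-- the 'for key in …: if key in v: return scale[key]' loop
def pvScanKeys (v : String) (ks : List String) (scale : List (String × Int)) : Int :=
  match ks with
  | [] => 0
  | k :: t => if PySem.Str.isIn k v then pvLookup scale k else pvScanKeys v t scale

def score_ordinal_py (value : Option String) (scale : List (String × Int)) : Int :=
  match value with
  | none => 0
  | some s =>
    if s = "" then 0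
    else
      let v := PySem.Str.lower (PySem.Str.strip s)
      pvScanKeys v (PySem.List.sorted (scale.map Prod.fst) (fun k => PySem.Str.len k) true) scale

-- ===== PORT B =====
def score_ordinal_py_alt (value : Option String) (scale : List (String × Int)) : Int :=
  match value with
  | none => 0
  | some s =>
    if s = "" then 0
    else
      let v := PySem.Str.lower (PySem.Str.strip s)
      (scale.foldl
        (fun acc kv =>
          if PySem.Str.isIn kv.1 v && acc.1 < PySem.Str.len kv.1 then (PySem.Str.len kv.1, kv.2) else acc)
        ((-1 : Int), (0 : Int))).2

-- ===== PRECONDITION & SPEC =====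
-- Pre_ excludes association lists with duplicate keys, which a Python dict (A's 'scale' parameter) can never carry.
def Pre_score_ordinal_py (_value : Option String) (scale : List (String × Int)) : Prop :=
  (scale.map Prod.fst).Nodup
instance (value : Option String) (scale : List (String × Int)) : Decidable (Pre_score_ordinal_py value scale) := by unfold Pre_score_ordinal_py; infer_instance

def pvWitness_score_ordinal_py : Option String × (List (String × Int)) :=
  (some "  Tried once or twice ", [("tried", 1), ("tried once", 2), ("never", 0)])

def Spec_score_ordinal_py (value : Option String) (scale : List (String × Int)) (out : Int) : Prop := out = score_ordinal_py_alt value scale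
instance (value : Option String) (scale : List (String × Int)) (out : Int) : Decidable (Spec_score_ordinal_py value scale out) := by unfold Spec_score_ordinal_py; infer_instance

-- ===== CLAIM (what is proved, stated in full; the proofs are below) =====
def Claim_equal_score_ordinal_py : Prop := ∀ (value : Option String) (scale : List (String × Int)), Dom_score_ordinal_py value scale → Pre_score_ordinal_py value scale → Spec_score_ordinal_py value scale (score_ordinal_py value scale)

-- ===== LEMMAS AND PROOFS =====

-- the loop of port A equals find?-then-lookup
theorem pvScanKeys_eq_find? (v : String) (ks : List String) (scale : List (String × Int)) :
    pvScanKeys v ks scale =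
      match ks.find? (fun k => PySem.Str.isIn k v) with
      | some m => pvLookup scale m
      | none => 0 := by
  induction ks with
  | nil => rfl
  | cons k t ih =>
    cases h : PySem.Str.isIn k v <;>
      simp only [pvScanKeys, List.find?_cons, h, ih] <;> rfl

-- inserting a key into a length-descending list: the first match is the old first match
-- unless the new key matches and is strictly longer
theorem find?_insertBy (v : String) (k : String) (ys : List String)
    (hp : ys.Pairwise (fun a b => PySem.Str.len b ≤ PySem.Str.len a)) :
    (PySem.List.insertBy (fun a b => decide (PySem.Str.len b < PySem.Str.len a)) k ys).find?
        (fun x => PySem.Str.isIn x v) =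
      if PySem.Str.isIn k v then
        match ys.find? (fun x => PySem.Str.isIn x v) with
        | some m => if PySem.Str.len k ≤ PySem.Str.len m then some m else some k
        | none => some k
      else ys.find? (fun x => PySem.Str.isIn x v) := by
  induction ys with
  | nil =>
    cases hk : PySem.Str.isIn k v <;>
      simp only [PySem.List.insertBy, List.find?_cons, List.find?_nil, hk] <;> rfl
  | cons y t ih =>
    have hpt : t.Pairwise (fun a b => PySem.Str.len b ≤ PySem.Str.len a) := hp.tail
    have hy : ∀ z ∈ t, PySem.Str.len z ≤ PySem.Str.len y := by
      intro z hz; exact (List.pairwise_cons.mp hp).1 z hz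
    have hins : PySem.List.insertBy (fun a b => decide (PySem.Str.len b < PySem.Str.len a)) k (y :: t)
        = if decide (PySem.Str.len y < PySem.Str.len k) then k :: y :: t
          else y :: PySem.List.insertBy (fun a b => decide (PySem.Str.len b < PySem.Str.len a)) k t := rfl
    by_cases hlt : PySem.Str.len y < PySem.Str.len k
    · rw [hins, if_pos (by simpa using hlt)]
      cases hk : PySem.Str.isIn k v with
      | false => simp only [List.find?_cons, hk]; rfl
      | true =>
        cases hfo : (y :: t).find? (fun x => PySem.Str.isIn x v) with
        | none => simp only [List.find?_cons, hk]; rfl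
        | some m =>
          have hm : m ∈ y :: t := List.mem_of_find?_eq_some hfo
          have hml : PySem.Str.len m ≤ PySem.Str.len y := by
            rcases List.mem_cons.mp hm with h | h
            · exact le_of_eq (by rw [h])
            · exact hy m h
          have hnle : ¬ PySem.Str.len k ≤ PySem.Str.len m := by omega
          simp only [List.find?_cons, hk, if_neg hnle]; rfl
    · rw [hins, if_neg (by simpa using hlt)]
      cases hyv : PySem.Str.isIn y v with
      | true =>
        have hky : PySem.Str.len k ≤ PySem.Str.len y := by omega
        cases hk : PySem.Str.isIn k v with
        | true => simp only [List.find?_cons, hyv, if_pos hky]; rfl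
        | false => simp only [List.find?_cons, hyv]; rfl
      | false =>
        simp only [List.find?_cons, hyv, ih hpt]

-- the lookup of the chosen key survives appending a fresh binding
theorem pvLookup_append_of_mem (scale : List (String × Int)) (p : String × Int) (m : String)
    (hm : m ∈ scale.map Prod.fst) :
    pvLookup (scale ++ [p]) m = pvLookup scale m := by
  rcases List.mem_map.mp hm with ⟨q, hq, hq1⟩
  unfold pvLookup
  rw [List.find?_append]
  cases h : scale.find? (fun r => r.1 == m) with
  | some r => rfl
  | none =>
    exfalso
    have := List.find?_eq_none.mp h q hq
    simp [hq1] at this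

theorem pvLookup_append_fresh (scale : List (String × Int)) (k : String) (sc : Int)
    (hk : k ∉ scale.map Prod.fst) :
    pvLookup (scale ++ [(k, sc)]) k = sc := by
  have hnone : scale.find? (fun r => r.1 == k) = none := by
    apply List.find?_eq_none.mpr
    intro r hr hbeq
    exact hk (List.mem_map.mpr ⟨r, hr, by simpa using hbeq⟩)
  unfold pvLookup
  rw [List.find?_append, hnone]
  simp

-- main invariant: B's fold over scale computes (length, score) of the first match
-- of the stably length-descending-sorted key list, i.e. A's chosen key
theorem fold_eq_sorted_find (v : String) (scale : List (String × Int))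
    (hnd : (scale.map Prod.fst).Nodup) :
    (scale.foldl
        (fun acc kv =>
          if PySem.Str.isIn kv.1 v && acc.1 < PySem.Str.len kv.1 then (PySem.Str.len kv.1, kv.2) else acc)
        ((-1 : Int), (0 : Int))) =
      match (PySem.List.sorted (scale.map Prod.fst) (fun k => PySem.Str.len k) true).find?
          (fun x => PySem.Str.isIn x v) with
      | some m => (PySem.Str.len m, pvLookup scale m)
      | none => ((-1 : Int), (0 : Int)) := by
  induction scale using List.reverseRecOn with
  | nil => rfl
  | append_singleton l p ih =>
    have hnd' : (l.map Prod.fst).Nodup := by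
      simpa using (List.nodup_append.mp (by simpa using hnd)).1
    have hfresh : p.1 ∉ l.map Prod.fst := by
      have := (List.nodup_append.mp (by simpa using hnd))
      intro hmem
      exact this.2.2 p.1 hmem p.1 (List.mem_singleton_self p.1) rfl
    have hsorted : PySem.List.sorted ((l ++ [p]).map Prod.fst) (fun k => PySem.Str.len k) true
        = PySem.List.insertBy (fun a b => decide (PySem.Str.len b < PySem.Str.len a)) p.1
            (PySem.List.sorted (l.map Prod.fst) (fun k => PySem.Str.len k) true) := by
      rw [PySem.List.sorted_rev_eq_foldl_insertBy, PySem.List.sorted_rev_eq_foldl_insertBy]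
      simp [List.foldl_append]
    have hpair : (PySem.List.sorted (l.map Prod.fst) (fun k => PySem.Str.len k) true).Pairwise
        (fun a b => PySem.Str.len b ≤ PySem.Str.len a) :=
      PySem.List.sorted_pairwise_rev (l.map Prod.fst) (fun k => PySem.Str.len k)
    rw [List.foldl_append, ih hnd', hsorted, find?_insertBy v p.1 _ hpair]
    have hp12 : p = (p.1, p.2) := rfl
    by_cases hk : PySem.Str.isIn p.1 v = true
    · have hk' : PySem.Chars.isIn p.1.toList v.toList = true := by simpa using hk
      cases hfo : (PySem.List.sorted (l.map Prod.fst) (fun k => PySem.Str.len k) true).find?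
          (fun x => PySem.Str.isIn x v) with
      | none =>
        have hgt : (-1 : Int) < (p.1.length : Int) := by
          have := Int.natCast_nonneg p.1.length; omega
        rw [hp12] at hfresh ⊢
        simp [hk', hgt, pvLookup_append_fresh l p.1 p.2 hfresh]
      | some m =>
        have hmem : m ∈ l.map Prod.fst := by
          have := List.mem_of_find?_eq_some hfo
          rwa [PySem.List.mem_sorted] at this
        have hlen : ∀ x : String, PySem.Str.len x = (x.length : Int) := by
          intro x; simp [PySem.Str.len]
        by_cases hle : PySem.Str.len p.1 ≤ PySem.Str.len m
        · have hle' : p.1.length ≤ m.length := by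
            rw [hlen, hlen] at hle; exact_mod_cast hle
          have hnlt : ¬ (m.length < p.1.length) := by omega
          simp [hk', hle', hnlt, pvLookup_append_of_mem l p m hmem]
        · have hlt' : m.length < p.1.length := by
            rw [hlen, hlen] at hle
            have : (m.length : Int) < p.1.length := by omega
            exact_mod_cast this
          have hnle : ¬ (p.1.length ≤ m.length) := by omega
          rw [hp12] at hfresh ⊢
          simp [hk', hlt', hnle, pvLookup_append_fresh l p.1 p.2 hfresh]
    · have hk' : PySem.Chars.isIn p.1.toList v.toList = false := by
        simpa using hk
      cases hfo : (PySem.List.sorted (l.map Prod.fst) (fun k => PySem.Str.len k) true).find?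
          (fun x => PySem.Str.isIn x v) with
      | none => simp [hk']
      | some m =>
        have hmem : m ∈ l.map Prod.fst := by
          have := List.mem_of_find?_eq_some hfo
          rwa [PySem.List.mem_sorted] at this
        simp [hk', pvLookup_append_of_mem l p m hmem]

-- ===== VERDICT (by name: the statement is the Claim_ definition above) =====
theorem score_ordinal_py_spec : Claim_equal_score_ordinal_py := by
  intro value scale _hdom hpre
  unfold Spec_score_ordinal_py score_ordinal_py score_ordinal_py_alt
  cases value with
  | none => rfl
  | some s =>
    by_cases hs : s = ""
    · simp [hs]
    · simp only [hs, if_false]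
      rw [pvScanKeys_eq_find?, fold_eq_sorted_find _ _ hpre]
      cases (PySem.List.sorted (scale.map Prod.fst) (fun k => PySem.Str.len k) true).find?
          (fun x => PySem.Str.isIn x (PySem.Str.lower (PySem.Str.strip s))) with
      | none => rfl
      | some m => rfl
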